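-- pv_equiv track=rewrite | github.com/codybartfast/aoc-2018-py | day07.py | part1
-- ===== SOURCE A (Python) =====
-- def relations(instructions):
--     instructions.sort(key=lambda kvp: kvp[1])
--     all_steps = list(sorted(set(step for instr in instructions for step in instr)))
--     supports = {step: [] for step in all_steps}
--     requires = {step: [] for step in all_steps}
--     for a, b in instructions:
--         supports[a].append(b)
--         requires[b].append(a)
--     return supports, requires
--
-- def part1(instructions, args, p1_state):
--     supports, requires = relations(instructions)
--
--     steps = []
--     for _ in range(len(supports)):
--         step = [key for key, val in requires.items() if not val][0]
--         requires.pop(step)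
--         for dependent in supports[step]:
--             requires[dependent].remove(step)
--         steps.append(step)
--     return "".join(steps)
-- ===== SOURCE B (Python) =====
-- def part1(instructions, args, p1_state):
--     steps = sorted({s for pair in instructions for s in pair})
--     preds = {s: {a for a, b in instructions if b == s} for s in steps}
--     placed = set()
--     out = []
--     for _ in steps:
--         nxt = min(s for s in steps if s not in placed and preds[s] <= placed)
--         out.append(nxt)
--         placed.add(nxt)
--     return "".join(out)
-- ===== Notes on version B (the rewrite author's own statement) =====
-- stated objective: simpler
-- what changed: B replaces A's mutable requires/supports dicts (popping keys and destructively removing satisfied prerequisites each round) with an immutable formulation: a precomputed predecessor-set per step and a growing 'placed' set, choosing at each round min(s not placed with preds[s] <= placed); no dict entries are ever mutated or deleted and B does not sort or mutate the input list.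
import Mathlib
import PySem

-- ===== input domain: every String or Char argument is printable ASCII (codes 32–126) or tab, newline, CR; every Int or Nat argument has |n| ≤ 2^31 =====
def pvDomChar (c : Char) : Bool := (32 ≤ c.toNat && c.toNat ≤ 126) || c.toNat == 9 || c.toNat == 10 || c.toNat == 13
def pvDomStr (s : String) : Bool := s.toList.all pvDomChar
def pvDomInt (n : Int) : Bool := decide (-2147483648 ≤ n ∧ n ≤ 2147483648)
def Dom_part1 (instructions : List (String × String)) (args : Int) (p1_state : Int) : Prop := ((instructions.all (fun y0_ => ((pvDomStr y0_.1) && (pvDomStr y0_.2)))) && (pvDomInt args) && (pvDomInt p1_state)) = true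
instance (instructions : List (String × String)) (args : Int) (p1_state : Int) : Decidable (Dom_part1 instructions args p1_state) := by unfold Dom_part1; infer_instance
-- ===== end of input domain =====

-- B replaces A's destructive dict bookkeeping by an immutable predecessor-set / placed-set formulation (objective: simpler);
-- equivalence is about the RETURN value only: Python A sorts `instructions` in place, B does not mutate its arguments.

-- ===== PORT A =====
def part1 (instructions : List (String × String)) (args : Int) (p1_state : Int) : String :=
  -- relations(): instructions.sort(key=lambda kvp: kvp[1])
  let instrS := PySem.List.sorted instructions (fun kvp => kvp.2) false
  let all_steps := PySem.List.sorted (PySem.Set.ofList (instrS.flatMap (fun p => [p.1, p.2]))) (fun x => x) false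
  let supports0 : PySem.Dict String (List String) := all_steps.foldl (fun d s => d.insert s []) PySem.Dict.empty
  let requires0 : PySem.Dict String (List String) := all_steps.foldl (fun d s => d.insert s []) PySem.Dict.empty
  let sr := instrS.foldl
      (fun (sr : PySem.Dict String (List String) × PySem.Dict String (List String)) p =>
        (sr.1.modify p.1 [] (fun l => l ++ [p.2]), sr.2.modify p.2 [] (fun l => l ++ [p.1])))
      (supports0, requires0)
  let supports := sr.1
  -- main loop: for _ in range(len(supports))
  let final := (PySem.List.pyRange 0 (supports.size : Int) 1).foldl
      (fun (st : PySem.Dict String (List String) × List String) _ =>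
        -- [key for key, val in requires.items() if not val][0] — raises IndexError when empty (excluded by Pre_)
        let step := ((st.1.items.filter (fun kv => kv.2 == [])).map (fun kv => kv.1)).headD ""
        let req1 := st.1.erase step
        let req2 := (supports.getD step []).foldl
            (fun r dep => r.modify dep [] (fun l => (PySem.List.remove? l step).getD l)) req1
        (req2, st.2 ++ [step]))
      (sr.2, [])
  PySem.Str.join "" final.2

-- ===== PORT B =====
def part1_alt (instructions : List (String × String)) (args : Int) (p1_state : Int) : String :=
  let steps := PySem.List.sorted (PySem.Set.ofList (instructions.flatMap (fun p => [p.1, p.2]))) (fun x => x) false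
  let preds : PySem.Dict String (PySem.Set String) := steps.foldl
      (fun d s => d.insert s (PySem.Set.ofList ((instructions.filter (fun p => p.2 == s)).map (fun p => p.1))))
      PySem.Dict.empty
  let final := steps.foldl
      (fun (st : PySem.Set String × List String) _ =>
        -- min(...) raises ValueError when no step is available (excluded by Pre_)
        let nxt := (PySem.List.min?
            (steps.filter (fun s => !(PySem.Set.contains st.1 s)
                && PySem.Set.issubset (preds.getD s PySem.Set.empty) st.1)) (fun x => x)).getD ""
        (PySem.Set.add st.1 nxt, st.2 ++ [nxt]))
      (PySem.Set.empty, [])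
  PySem.Str.join "" final.2

-- ===== PRECONDITION & SPEC =====
-- Pre_ excludes exactly the cyclic dependency graphs: there Python A raises IndexError (no step with empty
-- requirements is ever found) and Python B raises ValueError (min of an empty sequence).
def Pre_part1 (instructions : List (String × String)) (args : Int) (p1_state : Int) : Prop :=
  ∀ S ∈ (PySem.List.dedup (instructions.flatMap (fun p => [p.1, p.2]))).sublists,
    S ≠ [] → ∃ b ∈ S, ∀ p ∈ instructions, p.2 = b → p.1 ∉ S
instance (instructions : List (String × String)) (args : Int) (p1_state : Int) : Decidable (Pre_part1 instructions args p1_state) := by unfold Pre_part1; infer_instance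

def pvWitness_part1 : (List (String × String)) × Int × Int :=
  ([("C","A"),("C","F"),("A","B"),("A","D"),("B","E"),("D","E"),("F","E")], 0, 0)

def Spec_part1 (instructions : List (String × String)) (args : Int) (p1_state : Int) (out : String) : Prop := out = part1_alt instructions args p1_state
instance (instructions : List (String × String)) (args : Int) (p1_state : Int) (out : String) : Decidable (Spec_part1 instructions args p1_state out) := by unfold Spec_part1; infer_instance

-- ===== CLAIM (what is proved, stated in full; the proofs are below) =====
def Claim_equal_part1 : Prop := ∀ (instructions : List (String × String)) (args : Int) (p1_state : Int), Dom_part1 instructions args p1_state → Pre_part1 instructions args p1_state → Spec_part1 instructions args p1_state (part1 instructions args p1_state)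

-- ===== LEMMAS AND PROOFS =====

-- remove-one-occurrence as Python's list.remove wrapped total
def pvRmx (x : String) (l : List String) : List String := (PySem.List.remove? l x).getD l

def pvE (instr : List (String × String)) : List (String × String) :=
  PySem.List.sorted instr (fun kvp => kvp.2) false

def pvS (instr : List (String × String)) : List String :=
  PySem.List.sorted (PySem.Set.ofList ((pvE instr).flatMap (fun p => [p.1, p.2]))) (fun x => x) false

def pvVal (instr : List (String × String)) (done : List String) (b : String) : List String :=
  ((pvE instr).filter (fun p => p.2 == b && !(done.contains p.1))).map (fun p => p.1)

def pvR (instr : List (String × String)) (done : List String) : List String :=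
  (pvS instr).filter (fun s => !(done.contains s))

def pvCand (instr : List (String × String)) (done : List String) : List String :=
  (pvR instr done).filter (fun b => pvVal instr done b == [])

-- the loop body of port A's main loop
def pvFA (supports : PySem.Dict String (List String))
    (st : PySem.Dict String (List String) × List String) :
    PySem.Dict String (List String) × List String :=
  let step := ((st.1.items.filter (fun kv => kv.2 == [])).map (fun kv => kv.1)).headD ""
  let req1 := st.1.erase step
  let req2 := (supports.getD step []).foldl
      (fun r dep => r.modify dep [] (fun l => (PySem.List.remove? l step).getD l)) req1
  (req2, st.2 ++ [step])

-- the loop body of port B's main loop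
def pvFB (steps : List String) (preds : PySem.Dict String (PySem.Set String))
    (st : PySem.Set String × List String) : PySem.Set String × List String :=
  let nxt := (PySem.List.min?
      (steps.filter (fun s => !(PySem.Set.contains st.1 s)
          && PySem.Set.issubset (preds.getD s PySem.Set.empty) st.1)) (fun x => x)).getD ""
  (PySem.Set.add st.1 nxt, st.2 ++ [nxt])

lemma pvFoldl_const {α β : Type} (l : List β) (f : α → α) (init : α) :
    l.foldl (fun a _ => f a) init = f^[l.length] init := by
  induction l generalizing init with
  | nil => rfl
  | cons x t ih => simp [List.foldl_cons, ih, Function.iterate_succ_apply]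

lemma pvNodupS (instr : List (String × String)) : (pvS instr).Nodup :=
  (PySem.List.sorted_perm _ _ _).nodup_iff.mpr (PySem.Set.nodup_ofList _)

lemma pvPairwiseS (instr : List (String × String)) : (pvS instr).Pairwise (· < ·) :=
  PySem.List.sorted_ofList_pairwise_lt _

lemma mem_pvE (instr : List (String × String)) (p : String × String) :
    p ∈ pvE instr ↔ p ∈ instr := PySem.List.mem_sorted _ _ _ _

lemma mem_pvS (instr : List (String × String)) (a : String) :
    a ∈ pvS instr ↔ ∃ p ∈ instr, a = p.1 ∨ a = p.2 := by
  unfold pvS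
  rw [PySem.List.mem_sorted _ _ _ _, PySem.Set.mem_ofList]
  simp only [List.mem_flatMap, mem_pvE]
  constructor
  · rintro ⟨p, hp, h⟩; exact ⟨p, hp, by simpa using h⟩
  · rintro ⟨p, hp, h⟩; exact ⟨p, hp, by simpa using h⟩

-- B's steps list is the same list as A's all_steps
lemma pvS_alt (instr : List (String × String)) :
    PySem.List.sorted (PySem.Set.ofList (instr.flatMap (fun p => [p.1, p.2]))) (fun x => x) false
      = pvS instr := by
  apply PySem.List.sorted_eq_sorted_of_perm _ _ _ (fun a b h => h)
  apply (List.perm_ext_iff_of_nodup (PySem.Set.nodup_ofList _) (PySem.Set.nodup_ofList _)).mpr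
  intro a
  simp only [PySem.Set.mem_ofList, List.mem_flatMap, mem_pvE]

-- min of a strictly increasing list is its head
lemma pvMin_head (l : List String) (h : l.Pairwise (· < ·)) :
    (PySem.List.min? l (fun x => x)).getD "" = l.headD "" := by
  cases hl : l with
  | nil => simp [PySem.List.min?]
  | cons c t =>
    subst hl
    obtain ⟨m, hm⟩ : ∃ m, PySem.List.min? (c :: t) (fun x => x) = some m := by
      cases hmm : PySem.List.min? (c :: t) (fun x => x) with
      | none => exact absurd ((PySem.List.min?_eq_none_iff _ _).mp hmm) (by simp)
      | some m => exact ⟨m, rfl⟩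
    have hmem : m ∈ c :: t := PySem.List.min?_mem hm
    have hmin : ∀ y ∈ c :: t, m ≤ y := PySem.List.min?_isMin hm
    have : m = c := by
      rcases List.mem_cons.mp hmem with h1 | h1
      · exact h1
      · have hcm : c < m := (List.pairwise_cons.mp h).1 m h1
        have := hmin c (by simp)
        exact absurd (lt_of_le_of_lt this hcm) (lt_irrefl m)
    simp [hm, this]


lemma pvSet_update_of_subset (s : PySem.Set String) (xs : List String) (h : ∀ x ∈ xs, x ∈ s) :
    PySem.Set.update s xs = s := by
  induction xs generalizing s with
  | nil => rfl
  | cons x t ih =>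
    have hx : PySem.Set.add s x = s := by
      simp [PySem.Set.add, PySem.Set.contains, h x (by simp)]
    show PySem.Set.update (PySem.Set.add s x) t = s
    rw [hx]
    exact ih s (fun y hy => h y (by simp [hy]))

def pvD0 (instr : List (String × String)) : PySem.Dict String (List String) :=
  (pvS instr).foldl (fun d s => d.insert s []) PySem.Dict.empty

lemma pvD0_items (instr : List (String × String)) :
    (pvD0 instr).items = (pvS instr).map (fun s => (s, ([] : List String))) := by
  unfold pvD0
  rw [PySem.Dict.items_foldl_insert_fresh (pvS instr) (fun s => s) (fun _ => []) PySem.Dict.empty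
      (by intro a _; rfl) (by simpa using pvNodupS instr)]
  rfl

lemma pvD0_keys (instr : List (String × String)) : (pvD0 instr).keys = pvS instr := by
  show (pvD0 instr).items.map (fun p => p.1) = pvS instr
  rw [pvD0_items, List.map_map]
  exact (List.map_congr_left (fun a _ => rfl)).trans (List.map_id _)

lemma pvD0_getD (instr : List (String × String)) (c : String) : (pvD0 instr).getD c [] = [] := by
  by_cases hc : (pvD0 instr).contains c = true
  · have hck : c ∈ pvS instr := by rw [← pvD0_keys instr]; exact (PySem.Dict.contains_iff_mem_keys _ _).mp hc
    exact PySem.Dict.getD_of_mem_items _ (by rw [pvD0_items]; exact List.mem_map_of_mem hck)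
      (by rw [pvD0_keys]; exact pvNodupS instr) []
  · exact PySem.Dict.getD_of_not_contains _ _ (by revert hc; cases (pvD0 instr).contains c <;> simp)

def pvSup (instr : List (String × String)) : PySem.Dict String (List String) :=
  (pvE instr).foldl (fun d p => d.modify p.1 [] (fun l => l ++ [p.2])) (pvD0 instr)

def pvReq (instr : List (String × String)) : PySem.Dict String (List String) :=
  (pvE instr).foldl (fun d p => d.modify p.2 [] (fun l => l ++ [p.1])) (pvD0 instr)

lemma pvSup_keys (instr : List (String × String)) : (pvSup instr).keys = pvS instr := by
  unfold pvSup
  rw [PySem.Dict.keys_foldl_modify_key (pvE instr) (fun p => p.1) [] (fun _ p l => l ++ [p.2]) (pvD0 instr),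
    pvD0_keys]
  exact pvSet_update_of_subset _ _ (by
    intro x hx
    simp only [List.mem_map] at hx
    obtain ⟨p, hp, rfl⟩ := hx
    exact (mem_pvS instr _).mpr ⟨p, (mem_pvE instr p).mp hp, Or.inl rfl⟩)

lemma pvSup_getD (instr : List (String × String)) (c : String) :
    (pvSup instr).getD c [] = ((pvE instr).filter (fun p => p.1 == c)).map (fun p => p.2) := by
  unfold pvSup
  rw [PySem.Dict.getD_foldl_modify_append (pvE instr) (pvD0 instr) c, pvD0_getD]
  rfl

lemma pvSup_size (instr : List (String × String)) : (pvSup instr).size = (pvS instr).length := by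
  have h : (pvSup instr).items.length = (pvSup instr).keys.length := by
    show _ = ((pvSup instr).items.map (fun p => p.1)).length
    simp
  show (pvSup instr).items.length = _
  rw [h, pvSup_keys]

lemma pvReq_eq_swap_foldl (instr : List (String × String)) :
    pvReq instr = ((pvE instr).map Prod.swap).foldl
      (fun d p => d.modify p.1 [] (fun l => l ++ [p.2])) (pvD0 instr) := by
  rw [List.foldl_map]
  rfl

lemma pvReq_keys (instr : List (String × String)) : (pvReq instr).keys = pvS instr := by
  unfold pvReq
  rw [PySem.Dict.keys_foldl_modify_key (pvE instr) (fun p => p.2) [] (fun _ p l => l ++ [p.1]) (pvD0 instr),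
    pvD0_keys]
  exact pvSet_update_of_subset _ _ (by
    intro x hx
    simp only [List.mem_map] at hx
    obtain ⟨p, hp, rfl⟩ := hx
    exact (mem_pvS instr _).mpr ⟨p, (mem_pvE instr p).mp hp, Or.inr rfl⟩)

lemma pvReq_getD (instr : List (String × String)) (b : String) :
    (pvReq instr).getD b [] = ((pvE instr).filter (fun p => p.2 == b)).map (fun p => p.1) := by
  rw [pvReq_eq_swap_foldl,
    PySem.Dict.getD_foldl_modify_append ((pvE instr).map Prod.swap) (pvD0 instr) b, pvD0_getD]
  rw [List.filter_map, List.map_map]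
  rfl

lemma pvReq_items (instr : List (String × String)) :
    (pvReq instr).items = (pvS instr).map (fun b => (b, pvVal instr [] b)) := by
  rw [PySem.Dict.items_eq_map_keys (pvReq instr) (by rw [pvReq_keys]; exact pvNodupS instr) [],
    pvReq_keys]
  apply List.map_eq_map_iff.mpr
  intro b _
  rw [pvReq_getD]
  unfold pvVal
  have : List.filter (fun p => p.2 == b && !(([] : List String).contains p.1)) (pvE instr)
      = List.filter (fun p => p.2 == b) (pvE instr) := List.filter_congr (by intro p _; simp)
  rw [this]

def pvPreds (instr : List (String × String)) : PySem.Dict String (PySem.Set String) :=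
  (pvS instr).foldl
    (fun d s => d.insert s (PySem.Set.ofList ((instr.filter (fun p => p.2 == s)).map (fun p => p.1))))
    PySem.Dict.empty

lemma pvPreds_items (instr : List (String × String)) :
    (pvPreds instr).items = (pvS instr).map
      (fun s => (s, PySem.Set.ofList ((instr.filter (fun p => p.2 == s)).map (fun p => p.1)))) := by
  unfold pvPreds
  rw [PySem.Dict.items_foldl_insert_fresh (pvS instr) (fun s => s)
      (fun s => PySem.Set.ofList ((instr.filter (fun p => p.2 == s)).map (fun p => p.1)))
      PySem.Dict.empty (by intro a _; rfl) (by simpa using pvNodupS instr)]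
  rfl

lemma pvPreds_getD (instr : List (String × String)) (s : String) (hs : s ∈ pvS instr) :
    (pvPreds instr).getD s PySem.Set.empty
      = PySem.Set.ofList ((instr.filter (fun p => p.2 == s)).map (fun p => p.1)) := by
  apply PySem.Dict.getD_of_mem_items _ (by rw [pvPreds_items]; exact List.mem_map_of_mem hs)
  show ((pvPreds instr).items.map (fun p => p.1)).Nodup
  rw [pvPreds_items, List.map_map]
  have : List.map ((fun (p : String × PySem.Set String) => p.1) ∘ fun s =>
      (s, PySem.Set.ofList ((instr.filter (fun p => p.2 == s)).map (fun p => p.1)))) (pvS instr)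
      = pvS instr := (List.map_congr_left (fun a _ => rfl)).trans (List.map_id _)
  rw [this]
  exact pvNodupS instr


lemma pvRmx_cons (x a : String) (t : List String) (h : a ≠ x) :
    pvRmx x (a :: t) = a :: pvRmx x t := by
  unfold pvRmx
  rw [PySem.List.remove?_cons_of_ne t h]
  cases PySem.List.remove? t x <;> simp

lemma pvRmx_iterate_cons (x a : String) (h : a ≠ x) : ∀ (n : Nat) (t : List String),
    (pvRmx x)^[n] (a :: t) = a :: (pvRmx x)^[n] t := by
  intro n
  induction n with
  | zero => intro t; rfl
  | succ n ih =>
    intro t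
    rw [Function.iterate_succ_apply, Function.iterate_succ_apply, pvRmx_cons x a t h, ih]

-- removing x as many times as it occurs is filtering x out
lemma pvRmx_iterate_count (x : String) (v : List String) :
    (pvRmx x)^[v.count x] v = v.filter (fun a => !(a == x)) := by
  induction v with
  | nil => rfl
  | cons a t ih =>
    by_cases hax : a = x
    · subst hax
      rw [List.count_cons_self, Function.iterate_succ_apply]
      have h1 : pvRmx a (a :: t) = t := by
        unfold pvRmx; rw [PySem.List.remove?_cons_self]; rfl
      rw [h1, ih]
      simp
    · rw [List.count_cons_of_ne hax, pvRmx_iterate_cons x a hax, ih]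
      simp [hax]

-- a fold of modifies over present keys rewrites every value pointwise
lemma pvFoldl_modify_items (x : String) (ds : List String) :
    ∀ (r : PySem.Dict String (List String)), (∀ b ∈ ds, b ∈ r.keys) → r.keys.Nodup →
    (ds.foldl (fun r dep => r.modify dep [] (fun l => (PySem.List.remove? l x).getD l)) r).items
      = r.items.map (fun kv => (kv.1, (pvRmx x)^[ds.count kv.1] kv.2)) := by
  induction ds with
  | nil =>
    intro r _ _
    exact ((List.map_congr_left (fun a _ => rfl)).trans (List.map_id _)).symm
  | cons d ds ih =>
    intro r hmem hnd
    have hcont : r.contains d = true := (PySem.Dict.contains_iff_mem_keys _ _).mpr (hmem d (by simp))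
    have hitems : (r.modify d [] (fun l => (PySem.List.remove? l x).getD l)).items
        = r.items.map (fun p => if p.1 == d then (p.1, pvRmx x p.2) else p) := by
      show (r.insert d _).items = _
      rw [PySem.Dict.items_insert_of_contains r _ hcont]
      apply List.map_congr_left
      intro p hp
      by_cases hpd : p.1 = d
      · have : r.getD d [] = p.2 := by
          apply PySem.Dict.getD_of_mem_items r _ hnd
          have : p = (d, p.2) := by rw [← hpd]
          rw [← this]; exact hp
        simp [hpd, this, pvRmx]
      · simp [hpd]
    have hkeys : (r.modify d [] (fun l => (PySem.List.remove? l x).getD l)).keys = r.keys := by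
      show (r.modify d [] (fun l => (PySem.List.remove? l x).getD l)).items.map (fun p => p.1) = _
      rw [hitems, List.map_map]
      apply List.map_congr_left
      intro p _
      by_cases hpd : p.1 = d <;> simp [hpd]
    rw [List.foldl_cons, ih _ (by rw [hkeys]; exact fun b hb => hmem b (by simp [hb])) (by rw [hkeys]; exact hnd),
      hitems, List.map_map]
    apply List.map_congr_left
    intro p _
    show ((if (p.1 == d) = true then (p.1, pvRmx x p.2) else p).1,
        (pvRmx x)^[List.count (if (p.1 == d) = true then (p.1, pvRmx x p.2) else p).1 ds]
          (if (p.1 == d) = true then (p.1, pvRmx x p.2) else p).2)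
      = (p.1, (pvRmx x)^[List.count p.1 (d :: ds)] p.2)
    by_cases hpd : p.1 = d
    · rw [if_pos (by simp [hpd]), hpd, List.count_cons_self, Function.iterate_succ_apply]
    · rw [if_neg (by simp [hpd]), List.count_cons_of_ne (Ne.symm hpd)]

lemma pvContains_append (done : List String) (x a : String) :
    (done ++ [x]).contains a = (done.contains a || a == x) := by
  simp [beq_eq_decide]

lemma pvR_append (instr : List (String × String)) (done : List String) (x : String) :
    pvR instr (done ++ [x]) = (pvR instr done).filter (fun s => !(s == x)) := by
  unfold pvR
  rw [List.filter_filter]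
  apply List.filter_congr
  intro s _
  rw [pvContains_append]
  cases h1 : done.contains s <;> cases h2 : s == x <;> rfl

lemma pvVal_append (instr : List (String × String)) (done : List String) (x b : String) :
    pvVal instr (done ++ [x]) b = (pvVal instr done b).filter (fun a => !(a == x)) := by
  unfold pvVal
  rw [List.filter_map, List.filter_filter]
  congr 1
  apply List.filter_congr
  intro p _
  show (p.2 == b && !(done ++ [x]).contains p.1) = (!(p.1 == x) && (p.2 == b && !done.contains p.1))
  rw [pvContains_append]
  cases p.2 == b <;> cases done.contains p.1 <;> cases p.1 == x <;> rfl

-- the number of removals performed on requires[b] while placing x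
lemma pvCount_ds (instr : List (String × String)) (done : List String) (x b : String)
    (hx : x ∉ done) :
    (((pvE instr).filter (fun p => p.1 == x)).map (fun p => p.2)).count b = (pvVal instr done b).count x := by
  unfold pvVal
  rw [List.count_eq_countP, List.count_eq_countP, List.countP_map, List.countP_map,
    List.countP_filter, List.countP_filter]
  apply List.countP_congr
  intro p _
  show ((p.2 == b) && (p.1 == x)) = true ↔ ((p.1 == x) && (p.2 == b && !done.contains p.1)) = true
  constructor
  · intro h
    simp only [Bool.and_eq_true, beq_iff_eq] at h ⊢
    refine ⟨h.2, h.1, ?_⟩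
    rw [h.2]
    simpa using hx
  · intro h
    simp only [Bool.and_eq_true, beq_iff_eq] at h ⊢
    exact ⟨h.2.1, h.1⟩


lemma pvR_nil (instr : List (String × String)) : pvR instr [] = pvS instr :=
  List.filter_eq_self.mpr (fun _ _ => rfl)

-- A's availability list under the invariant is pvCand
lemma pvAvail (instr : List (String × String)) (done : List String)
    (r : PySem.Dict String (List String))
    (hinv : r.items = (pvR instr done).map (fun b => (b, pvVal instr done b))) :
    (r.items.filter (fun kv => kv.2 == [])).map (fun kv => kv.1) = pvCand instr done := by
  rw [hinv, List.filter_map, List.map_map]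
  exact (List.map_congr_left (fun a _ => rfl)).trans (List.map_id _)

-- B's availability list is pvCand as well
lemma pvBcand (instr : List (String × String)) (done : List String) :
    (pvS instr).filter (fun s => !(PySem.Set.contains done s)
        && PySem.Set.issubset ((pvPreds instr).getD s PySem.Set.empty) done)
      = pvCand instr done := by
  unfold pvCand pvR
  rw [List.filter_filter]
  apply List.filter_congr
  intro s hs
  rw [pvPreds_getD instr s hs]
  have h2 : PySem.Set.issubset (PySem.Set.ofList ((instr.filter (fun p => p.2 == s)).map (fun p => p.1))) done
      = (pvVal instr done s == []) := by
    apply Bool.eq_iff_iff.mpr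
    rw [PySem.Set.issubset_iff]
    constructor
    · intro h
      have : pvVal instr done s = [] := by
        unfold pvVal
        rw [List.map_eq_nil_iff, List.filter_eq_nil_iff]
        intro p hp
        simp only [Bool.and_eq_true, beq_iff_eq, Bool.not_eq_eq_eq_not, Bool.not_true, not_and]
        intro h2s
        have hmem : p.1 ∈ done := by
          apply h
          rw [PySem.Set.mem_ofList]
          exact List.mem_map_of_mem (List.mem_filter.mpr ⟨(mem_pvE instr p).mp hp, by simp [h2s]⟩)
        simpa using hmem
      simp [this]
    · intro h a ha
      rw [PySem.Set.mem_ofList] at ha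
      obtain ⟨p, hp, rfl⟩ := List.mem_map.mp ha
      obtain ⟨hpi, hps⟩ := List.mem_filter.mp hp
      have hval : pvVal instr done s = [] := by simpa using h
      unfold pvVal at hval
      rw [List.map_eq_nil_iff, List.filter_eq_nil_iff] at hval
      have := hval p ((mem_pvE instr p).mpr hpi)
      simp only [Bool.and_eq_true, Bool.not_eq_eq_eq_not, Bool.not_true, not_and] at this
      have hc := this (by simpa using hps)
      by_contra hnot
      have hcf : done.contains p.1 = false := by simpa using hnot
      exact hc hcf
  rw [h2]
  show (!(done.contains s) && (pvVal instr done s == [])) = ((pvVal instr done s == []) && !(done.contains s))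
  exact Bool.and_comm _ _

-- under the precondition a zero-requirement step always exists
lemma pvCand_ne (instr : List (String × String)) (done : List String)
    (hpre : ∀ S ∈ (PySem.List.dedup (instr.flatMap (fun p => [p.1, p.2]))).sublists,
      S ≠ [] → ∃ b ∈ S, ∀ p ∈ instr, p.2 = b → p.1 ∉ S)
    (hlt : done.length < (pvS instr).length) :
    pvCand instr done ≠ [] := by
  set L := PySem.List.dedup (instr.flatMap (fun p => [p.1, p.2])) with hL
  have hmemL : ∀ a, a ∈ L ↔ a ∈ pvS instr := by
    intro a
    rw [hL, PySem.List.mem_dedup, mem_pvS]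
    simp only [List.mem_flatMap, List.mem_cons]
    constructor
    · rintro ⟨p, hp, h⟩; exact ⟨p, hp, by tauto⟩
    · rintro ⟨p, hp, h⟩; exact ⟨p, hp, by tauto⟩
  have hndL : L.Nodup := PySem.List.nodup_dedup _
  have hlenL : L.length = (pvS instr).length :=
    ((List.perm_ext_iff_of_nodup hndL (pvNodupS instr)).mpr hmemL).length_eq
  set S' := L.filter (fun a => !(done.contains a)) with hS'
  have hS'mem : S' ∈ L.sublists := List.mem_sublists.mpr List.filter_sublist
  have hS'ne : S' ≠ [] := by
    intro hnil
    have : ∀ a ∈ L, a ∈ done := by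
      intro a ha
      have := List.filter_eq_nil_iff.mp hnil a ha
      simpa using this
    have hle : L.length ≤ done.length := by
      classical
      have h1 : L.length = L.toFinset.card := (List.toFinset_card_of_nodup hndL).symm
      have h2 : L.toFinset ⊆ done.toFinset := by
        intro a ha; rw [List.mem_toFinset] at ha ⊢; exact this a ha
      have h3 := Finset.card_le_card h2
      have h4 := done.toFinset_card_le
      omega
    omega
  obtain ⟨b, hbS', hb⟩ := hpre S' hS'mem hS'ne
  have hbL : b ∈ L := (List.mem_filter.mp hbS').1
  have hbdone : b ∉ done := by
    have := (List.mem_filter.mp hbS').2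
    simpa using this
  apply List.ne_nil_of_mem (a := b)
  unfold pvCand pvR
  rw [List.mem_filter, List.mem_filter]
  refine ⟨⟨(hmemL b).mp hbL, by simpa using hbdone⟩, ?_⟩
  have : pvVal instr done b = [] := by
    unfold pvVal
    rw [List.map_eq_nil_iff, List.filter_eq_nil_iff]
    intro p hp
    simp only [Bool.and_eq_true, beq_iff_eq, Bool.not_eq_eq_eq_not, Bool.not_true, not_and]
    intro h2b
    have hp1 : p.1 ∉ S' := hb p ((mem_pvE instr p).mp hp) h2b
    have hp1L : p.1 ∈ L := by
      rw [hL, PySem.List.mem_dedup]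
      exact List.mem_flatMap.mpr ⟨p, (mem_pvE instr p).mp hp, by simp⟩
    rw [hS', List.mem_filter] at hp1
    rw [not_and] at hp1
    have := hp1 hp1L
    revert this
    cases hdc : done.contains p.1 <;> simp
  simp [this]

-- the main loop coupling: both loops emit the same steps
lemma pvLoop (instr : List (String × String))
    (hpre : ∀ S ∈ (PySem.List.dedup (instr.flatMap (fun p => [p.1, p.2]))).sublists,
      S ≠ [] → ∃ b ∈ S, ∀ p ∈ instr, p.2 = b → p.1 ∉ S) :
    ∀ (k : Nat) (done acc : List String) (r : PySem.Dict String (List String)),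
    r.items = (pvR instr done).map (fun b => (b, pvVal instr done b)) →
    (∀ p ∈ instr, p.2 ∈ done → p.1 ∈ done) →
    k + done.length = (pvS instr).length →
    ((pvFA (pvSup instr))^[k] (r, acc)).2 = ((pvFB (pvS instr) (pvPreds instr))^[k] (done, acc)).2 := by
  intro k
  induction k with
  | zero => intro done acc r _ _ _; rfl
  | succ k ih =>
    intro done acc r hinv hclosed hk
    have hlt : done.length < (pvS instr).length := by omega
    obtain ⟨c, t, hct⟩ : ∃ c t, pvCand instr done = c :: t := by
      cases h : pvCand instr done with
      | nil => exact absurd h (pvCand_ne instr done hpre hlt)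
      | cons c t => exact ⟨c, t, rfl⟩
    have hcmem : c ∈ pvCand instr done := by rw [hct]; simp
    have hcR : c ∈ pvR instr done := (List.mem_filter.mp hcmem).1
    have hcS : c ∈ pvS instr := (List.mem_filter.mp hcR).1
    have hcdone : c ∉ done := by
      have := (List.mem_filter.mp hcR).2
      simpa using this
    have hcval : pvVal instr done c = [] := by
      have := (List.mem_filter.mp hcmem).2
      simpa using this
    have hcval' : ∀ p ∈ pvE instr, p.2 = c → p.1 ∈ done := by
      intro p hp h2
      have hfil := List.filter_eq_nil_iff.mp (List.map_eq_nil_iff.mp hcval) p hp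
      simp only [Bool.and_eq_true, beq_iff_eq, Bool.not_eq_eq_eq_not, Bool.not_true, not_and] at hfil
      have hc := hfil h2
      by_contra hnot
      have hcf : done.contains p.1 = false := by simpa using hnot
      exact hc hcf
    -- one step of A
    have hstepA1 : ((r.items.filter (fun kv => kv.2 == [])).map (fun kv => kv.1)).headD "" = c := by
      rw [pvAvail instr done r hinv, hct]; rfl
    have herase : (r.erase c).items = (pvR instr (done ++ [c])).map (fun b => (b, pvVal instr done b)) := by
      show r.items.filter (fun p => !(p.1 == c)) = _
      rw [hinv, List.filter_map, pvR_append]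
      rfl
    have heraseKeys : (r.erase c).keys = pvR instr (done ++ [c]) := by
      show (r.erase c).items.map (fun p => p.1) = _
      rw [herase, List.map_map]
      exact (List.map_congr_left (fun a _ => rfl)).trans (List.map_id _)
    have hndR : (pvR instr (done ++ [c])).Nodup := (pvNodupS instr).filter _
    have hds : ∀ b ∈ ((pvE instr).filter (fun p => p.1 == c)).map (fun p => p.2), b ∈ (r.erase c).keys := by
      intro b hb
      obtain ⟨p, hp, rfl⟩ := List.mem_map.mp hb
      obtain ⟨hpE, hp1⟩ := List.mem_filter.mp hp
      have hp1c : p.1 = c := by simpa using hp1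
      rw [heraseKeys]
      unfold pvR
      rw [List.mem_filter]
      constructor
      · exact (mem_pvS instr _).mpr ⟨p, (mem_pvE instr p).mp hpE, Or.inr rfl⟩
      · have h1 : p.2 ∉ done := by
          intro hmem
          exact hcdone (hp1c ▸ hclosed p ((mem_pvE instr p).mp hpE) hmem)
        have h2 : p.2 ≠ c := by
          intro he
          exact hcdone (hp1c ▸ hcval' p hpE he)
        rw [pvContains_append]
        simp [h1, h2]
    have hstepA : pvFA (pvSup instr) (r, acc)
        = ((((pvE instr).filter (fun p => p.1 == c)).map (fun p => p.2)).foldl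
            (fun r dep => r.modify dep [] (fun l => (PySem.List.remove? l c).getD l)) (r.erase c),
          acc ++ [c]) := by
      show (_, _) = _
      rw [hstepA1, pvSup_getD]
    have hreq2 : ((((pvE instr).filter (fun p => p.1 == c)).map (fun p => p.2)).foldl
          (fun r dep => r.modify dep [] (fun l => (PySem.List.remove? l c).getD l)) (r.erase c)).items
        = (pvR instr (done ++ [c])).map (fun b => (b, pvVal instr (done ++ [c]) b)) := by
      rw [pvFoldl_modify_items c _ (r.erase c) hds (by rw [heraseKeys]; exact hndR), herase, List.map_map]
      apply List.map_congr_left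
      intro b hb
      show (b, (pvRmx c)^[List.count b _] (pvVal instr done b)) = (b, pvVal instr (done ++ [c]) b)
      rw [pvCount_ds instr done c b hcdone, pvRmx_iterate_count, pvVal_append]
    -- one step of B
    have hstepB1 : (PySem.List.min? ((pvS instr).filter (fun s => !(PySem.Set.contains done s)
          && PySem.Set.issubset ((pvPreds instr).getD s PySem.Set.empty) done)) (fun x => x)).getD "" = c := by
      rw [pvBcand instr done]
      have hpw : (pvCand instr done).Pairwise (· < ·) := List.Pairwise.sublist
        (by unfold pvCand pvR; exact List.filter_sublist.trans List.filter_sublist)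
        (pvPairwiseS instr)
      rw [pvMin_head _ hpw, hct]
      rfl
    have haddB : PySem.Set.add done c = done ++ [c] := by
      have : PySem.Set.contains done c = false := by
        show done.contains c = false
        simpa using hcdone
      simp [PySem.Set.add, hcdone]
    have hstepB : pvFB (pvS instr) (pvPreds instr) (done, acc) = (done ++ [c], acc ++ [c]) := by
      show (_, _) = _
      rw [hstepB1, haddB]
    rw [Function.iterate_succ_apply, Function.iterate_succ_apply, hstepA, hstepB]
    apply ih (done ++ [c]) (acc ++ [c]) _ hreq2
    · intro p hp hmem
      rcases List.mem_append.mp hmem with h | h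
      · exact List.mem_append_left _ (hclosed p hp h)
      · have : p.2 = c := by simpa using h
        exact List.mem_append_left _ (hcval' p ((mem_pvE instr p).mpr hp) this)
    · rw [List.length_append]
      simp only [List.length_singleton]
      omega

-- the ports as iterates of the loop bodies
lemma part1_eq (instructions : List (String × String)) (args p1_state : Int) :
    part1 instructions args p1_state
      = PySem.Str.join "" (((pvFA (pvSup instructions))^[(pvS instructions).length]
          (pvReq instructions, [])).2) := by
  unfold part1
  dsimp only
  rw [PySem.List.foldl_prod_mk
    (f := fun (d : PySem.Dict String (List String)) (p : String × String) => d.modify p.1 [] (fun l => l ++ [p.2]))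
    (g := fun (d : PySem.Dict String (List String)) (p : String × String) => d.modify p.2 [] (fun l => l ++ [p.1]))]
  show PySem.Str.join "" (((PySem.List.pyRange 0 (((pvSup instructions).size : Int)) 1).foldl
      (fun st _ => pvFA (pvSup instructions) st) (pvReq instructions, [])).2) = _
  rw [pvFoldl_const, PySem.List.length_pyRange_one]
  norm_num [pvSup_size]

lemma part1_alt_eq (instructions : List (String × String)) (args p1_state : Int) :
    part1_alt instructions args p1_state
      = PySem.Str.join "" (((pvFB (pvS instructions) (pvPreds instructions))^[(pvS instructions).length]
          ([], [])).2) := by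
  unfold part1_alt
  dsimp only
  rw [pvS_alt]
  show PySem.Str.join "" (((pvS instructions).foldl
      (fun st _ => pvFB (pvS instructions) (pvPreds instructions) st) ([], [])).2) = _
  rw [pvFoldl_const]

-- ===== VERDICT (by name: the statement is the Claim_ definition above) =====
theorem part1_spec : Claim_equal_part1 := by
  unfold Claim_equal_part1
  intro instructions args p1_state _ hpre
  unfold Spec_part1
  rw [part1_eq, part1_alt_eq]
  apply congrArg
  have h0 : (pvReq instructions).items
      = (pvR instructions []).map (fun b => (b, pvVal instructions [] b)) := by
    rw [pvReq_items, pvR_nil]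
  exact pvLoop instructions hpre (pvS instructions).length [] [] (pvReq instructions) h0
    (by intro p _ h; cases h) (by simp)
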